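-- pv_equiv track=rewrite | github.com/Tanvi-cmyk/adaptive-sql-query-optimizer-ai-sql | Adaptive-SQL-Optimizer/app.py | modify_query
-- ===== SOURCE A (Python) =====
-- def modify_query(query, user_id):
--     if user_id == "guest":
--         return query
--
--     words = query.split()
--     keywords = ["from", "into", "update", "table"]
--
--     for i, word in enumerate(words):
--         if word.lower() in keywords and i + 1 < len(words):
--             table_name = words[i + 1]
--             if not table_name.startswith(f"user_{user_id}_"):
--                 words[i + 1] = f"user_{user_id}_{table_name}"
--
--     return " ".join(words)
-- ===== SOURCE B (Python) =====
-- def modify_query(query, user_id):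
--     if user_id == "guest":
--         return query
--     prefix = f"user_{user_id}_"
--     keywords = ("from", "into", "update", "table")
--
--     def go(ws):
--         # recursive descent: consume a keyword together with the table name that
--         # follows it (a prefixed table name can never act as a keyword), else one word
--         if not ws:
--             return []
--         w = ws[0]
--         if w.lower() in keywords and len(ws) > 1:
--             nxt = ws[1]
--             if not nxt.startswith(prefix):
--                 nxt = prefix + nxt
--             return [w, nxt] + go(ws[2:])
--         return [w] + go(ws[1:])
--
--     return " ".join(go(query.split()))
-- ===== Notes on version B (the rewrite author's own statement) =====
-- stated objective: alternative
-- what changed: Replaced A's in-place mutation loop with index look-ahead by a recursive descent over the word list that consumes a keyword TOGETHER with its table name in one step (two tokens at a time), relying on the fact that a prefixed table name can never itself act as a keyword.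
import Mathlib
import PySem

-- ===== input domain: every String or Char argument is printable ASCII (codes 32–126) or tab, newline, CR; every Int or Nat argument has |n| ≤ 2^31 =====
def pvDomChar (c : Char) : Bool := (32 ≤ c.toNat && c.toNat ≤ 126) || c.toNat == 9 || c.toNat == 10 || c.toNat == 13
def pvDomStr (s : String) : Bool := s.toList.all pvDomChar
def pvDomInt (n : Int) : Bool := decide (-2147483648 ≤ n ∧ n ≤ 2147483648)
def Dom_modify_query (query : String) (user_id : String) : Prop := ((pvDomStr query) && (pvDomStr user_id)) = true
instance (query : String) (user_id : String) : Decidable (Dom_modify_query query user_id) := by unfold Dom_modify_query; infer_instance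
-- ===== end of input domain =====

-- B replaces A's in-place mutation loop with index look-ahead by a recursive descent that
-- consumes a keyword together with its table name in one step (objective: alternative).

-- ===== PORT A =====
-- one iteration of A's loop at index i, reading/writing the LIVE word list (indices used are in range)
def pvStepA (pfx : String) (n : Nat) (ws : List String) (i : Nat) : List String :=
  let word := ws.getD i ""
  if (["from", "into", "update", "table"].contains (PySem.Str.lower word)) && decide (i + 1 < n) then
    let table_name := ws.getD (i + 1) ""
    if !(PySem.Str.startswith table_name pfx) then ws.set (i + 1) (pfx ++ table_name) else ws
  else ws

def modify_query (query : String) (user_id : String) : String :=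
  if user_id == "guest" then query
  else
    let words := PySem.Str.split₀ query
    -- Python's `for i, word in enumerate(words)` over a list being mutated in place reads the
    -- live list at each index: ported by hand as an index loop over the live state (exact here,
    -- since mutation never changes the length and all indices used are in range)
    let words' := (List.range words.length).foldl (pvStepA ("user_" ++ user_id ++ "_") words.length) words
    PySem.Str.join " " words'

-- ===== PORT B =====
-- B's recursive helper `go`: consume keyword + following table name as a pair, else one word
def pvGoB (pfx : String) : List String → List String
  | [] => []
  | w :: ws =>
    if ["from", "into", "update", "table"].contains (PySem.Str.lower w) then
      match ws with
      | [] => w :: pvGoB pfx []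
      | nxt :: rest =>
        let nxt' := if PySem.Str.startswith nxt pfx then nxt else pfx ++ nxt
        w :: nxt' :: pvGoB pfx rest
    else w :: pvGoB pfx ws
termination_by l => l.length
decreasing_by all_goals (simp only [List.length_cons]; omega)

def modify_query_alt (query : String) (user_id : String) : String :=
  if user_id == "guest" then query
  else PySem.Str.join " " (pvGoB ("user_" ++ user_id ++ "_") (PySem.Str.split₀ query))

-- ===== PRECONDITION & SPEC =====
def Spec_modify_query (query : String) (user_id : String) (out : String) : Prop := out = modify_query_alt query user_id
instance (query : String) (user_id : String) (out : String) : Decidable (Spec_modify_query query user_id out) := by unfold Spec_modify_query; infer_instance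

-- ===== CLAIM (what is proved, stated in full; the proofs are below) =====
def Claim_equal_modify_query : Prop := ∀ (query : String) (user_id : String), Dom_modify_query query user_id → Spec_modify_query query user_id (modify_query query user_id)

-- ===== LEMMAS AND PROOFS =====

-- A's loop as a structural look-ahead recursion (proof-side reformulation of the index fold)
def pvARec (pfx : String) : List String → List String
  | [] => []
  | [w] => [w]
  | w :: w2 :: ws =>
    if ["from", "into", "update", "table"].contains (PySem.Str.lower w) then
      w :: pvARec pfx ((if PySem.Str.startswith w2 pfx then w2 else pfx ++ w2) :: ws)
    else
      w :: pvARec pfx (w2 :: ws)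
termination_by l => l.length
decreasing_by all_goals simp

theorem pvFold_aux (pfx : String) : ∀ (k : Nat) (ws pre : List String), ws.length = k →
    (List.range' pre.length ws.length).foldl (pvStepA pfx (pre.length + ws.length)) (pre ++ ws)
      = pre ++ pvARec pfx ws := by
  intro k
  induction k with
  | zero =>
    intro ws pre h
    rw [List.length_eq_zero_iff] at h
    subst h
    simp [pvARec]
  | succ k ih =>
    intro ws pre h
    match ws with
    | [] => simp at h
    | w :: rest =>
      simp only [List.length_cons] at h ⊢
      rw [List.range'_succ, List.foldl_cons]
      match rest with
      | [] =>
        simp [pvStepA, pvARec]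
      | w2 :: ws' =>
        simp only [List.length_cons] at h ⊢
        have hget1 : (pre ++ w :: w2 :: ws').getD pre.length "" = w := by
          simp [List.getD]
        have hget2 : (pre ++ w :: w2 :: ws').getD (pre.length + 1) "" = w2 := by
          simp [List.getD]
        have hlt : (decide (pre.length + 1 < pre.length + (ws'.length + 1 + 1))) = true := by
          simp
        -- the induction step, shared by all three branches
        have key : ∀ (x : String),
            (List.range' (pre.length + 1) (ws'.length + 1)).foldl
                (pvStepA pfx (pre.length + (ws'.length + 1 + 1))) (pre ++ w :: x :: ws')
              = pre ++ w :: pvARec pfx (x :: ws') := by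
          intro x
          have hlen : (pre ++ [w]).length = pre.length + 1 := by simp
          have := ih (x :: ws') (pre ++ [w]) (by simp; omega)
          rw [hlen] at this
          rw [show pre.length + (ws'.length + 1 + 1) = pre.length + 1 + (x :: ws').length by
            simp; omega]
          simpa using this
        by_cases hk : (["from", "into", "update", "table"].contains (PySem.Str.lower w)) = true
        · by_cases hs : (PySem.Str.startswith w2 pfx) = true
          · have hstep : pvStepA pfx (pre.length + (ws'.length + 1 + 1)) (pre ++ w :: w2 :: ws')
                pre.length = pre ++ w :: w2 :: ws' := by
              simp only [pvStepA, hget1, hget2, hk, hlt, hs, Bool.and_self, Bool.not_true,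
                Bool.false_eq_true, if_false, if_true]
            have hs' : PySem.Chars.startswith w2.toList pfx.toList = true := by simpa using hs
            rw [hstep, key w2]
            simp [pvARec, hs']
          · have hset : (pre ++ w :: w2 :: ws').set (pre.length + 1) (pfx ++ w2)
                = pre ++ w :: (pfx ++ w2) :: ws' := by
              rw [List.set_append_right _ _ (Nat.le_succ_of_le (Nat.le_refl pre.length))]
              simp [Nat.succ_sub (Nat.le_refl pre.length)]
            have hstep : pvStepA pfx (pre.length + (ws'.length + 1 + 1)) (pre ++ w :: w2 :: ws')
                pre.length = pre ++ w :: (pfx ++ w2) :: ws' := by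
              simp only [pvStepA, hget1, hget2, hk, hlt, hs, Bool.and_self, Bool.not_false,
                if_true, hset]
            have hs' : PySem.Chars.startswith w2.toList pfx.toList = false := by simpa using hs
            rw [hstep, key (pfx ++ w2)]
            simp [pvARec, hs']
            intro h1 h2 h3 h4
            simp [h1, h2, h3, h4] at hk
        · have hstep : pvStepA pfx (pre.length + (ws'.length + 1 + 1)) (pre ++ w :: w2 :: ws')
              pre.length = pre ++ w :: w2 :: ws' := by
            simp only [pvStepA, hget1, hk, Bool.false_and, Bool.false_eq_true, if_false]
          have hk' : (["from", "into", "update", "table"].contains (PySem.Str.lower w)) = false := by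
            simpa using hk
          rw [hstep, key w2]
          simp [pvARec]
          intro hcon
          rcases hcon with h | h | h | h <;> simp [h] at hk'

-- a word starting with "user_…_" can never be one of the four keywords
theorem pvPrefixedNotKw (uid x : String)
    (h : PySem.Str.startswith x ("user_" ++ uid ++ "_") = true) :
    (["from", "into", "update", "table"].contains (PySem.Str.lower x)) = false := by
  simp only [PySem.Str.startswith_eq, PySem.Chars.startswith_iff, String.toList_append] at h
  obtain ⟨t, ht⟩ := h
  have hx : x.toList = 'u' :: 's' :: 'e' :: 'r' :: '_' :: (uid.toList ++ '_' :: t) := by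
    rw [← ht]; simp
  simp only [List.contains_eq_any_beq, List.any_cons, List.any_nil, Bool.or_false,
    Bool.or_eq_false_iff, beq_eq_false_iff_ne, ne_eq]
  refine ⟨?_, ?_, ?_, ?_⟩ <;>
  · intro heq
    have h2 := congrArg String.toList heq
    rw [PySem.Str.toList_lower, hx] at h2
    simp only [PySem.Chars.lower, List.map_cons, show PySem.Chars.lowerChar 'u' = 'u' from rfl,
      show PySem.Chars.lowerChar 's' = 's' from rfl, show PySem.Chars.lowerChar 'e' = 'e' from rfl,
      show PySem.Chars.lowerChar 'r' = 'r' from rfl, show PySem.Chars.lowerChar '_' = '_' from rfl] at h2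
    simp at h2

theorem pvStartsPrefix (uid w : String) :
    PySem.Str.startswith (("user_" ++ uid ++ "_") ++ w) ("user_" ++ uid ++ "_") = true := by
  simp [PySem.Str.startswith_eq, PySem.Chars.startswith_iff]

theorem pvARec_eq_goB (uid : String) : ∀ (k : Nat) (ws : List String), ws.length ≤ k →
    pvARec ("user_" ++ uid ++ "_") ws = pvGoB ("user_" ++ uid ++ "_") ws := by
  intro k
  induction k with
  | zero =>
    intro ws h
    rw [Nat.le_zero, List.length_eq_zero_iff] at h
    subst h
    simp [pvARec, pvGoB]
  | succ k ih =>
    intro ws h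
    match ws with
    | [] => simp [pvARec, pvGoB]
    | [w] =>
      by_cases hk : (["from", "into", "update", "table"].contains (PySem.Str.lower w)) = true <;>
        simp [pvARec, pvGoB, hk]
    | w :: w2 :: ws =>
      simp only [List.length_cons] at h
      set pfx := "user_" ++ uid ++ "_" with hpfx
      by_cases hk : (["from", "into", "update", "table"].contains (PySem.Str.lower w)) = true
      · set w2' := if PySem.Str.startswith w2 pfx then w2 else pfx ++ w2 with hw2'
        have e1 : pvARec pfx (w :: w2 :: ws) = w :: pvARec pfx (w2' :: ws) := by
          rw [pvARec, if_pos hk, ← hw2']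
        have e2 : pvGoB pfx (w :: w2 :: ws) = w :: w2' :: pvGoB pfx ws := by
          rw [pvGoB, if_pos hk]
        have hsw : PySem.Str.startswith w2' pfx = true := by
          by_cases hs : PySem.Str.startswith w2 pfx = true
          · rw [hw2', if_pos hs]; exact hs
          · rw [hw2', if_neg hs, hpfx]; exact pvStartsPrefix uid w2
        have hnk' : ¬ (["from", "into", "update", "table"].contains (PySem.Str.lower w2') = true) := by
          rw [pvPrefixedNotKw uid w2' (hpfx ▸ hsw)]
          exact Bool.false_ne_true
        have hmid : pvARec pfx (w2' :: ws) = w2' :: pvGoB pfx ws := by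
          match ws with
          | [] => simp [pvARec, pvGoB]
          | v :: vs =>
            have e3 : pvARec pfx (w2' :: v :: vs) = w2' :: pvARec pfx (v :: vs) := by
              rw [pvARec, if_neg hnk']
            rw [e3, ih (v :: vs) (by simp only [List.length_cons] at h ⊢; omega)]
        rw [e1, hmid, e2]
      · have e1 : pvARec pfx (w :: w2 :: ws) = w :: pvARec pfx (w2 :: ws) := by
          rw [pvARec, if_neg hk]
        have e2 : pvGoB pfx (w :: w2 :: ws) = w :: pvGoB pfx (w2 :: ws) := by
          rw [pvGoB, if_neg hk]
        rw [e1, e2, ih (w2 :: ws) (by simp only [List.length_cons]; omega)]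

-- ===== VERDICT (by name: the statement is the Claim_ definition above) =====
theorem modify_query_spec : Claim_equal_modify_query := by
  intro query user_id _
  unfold Spec_modify_query modify_query modify_query_alt
  by_cases hg : (user_id == "guest") = true
  · simp [hg]
  · simp only [hg, Bool.false_eq_true, if_false]
    have hfold := pvFold_aux ("user_" ++ user_id ++ "_") (PySem.Str.split₀ query).length
      (PySem.Str.split₀ query) [] rfl
    simp only [List.length_nil, List.nil_append, Nat.zero_add] at hfold
    rw [List.range_eq_range', hfold,
      pvARec_eq_goB user_id (PySem.Str.split₀ query).length _ (Nat.le_refl _)]
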